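-- pv_equiv track=rewrite | github.com/adelocosa/aoc2023 | day 02 p1.py | parse_games
-- ===== SOURCE A (Python) =====
-- from typing import Sequence
--
-- def parse_games(input: Sequence[str]) -> list[list[dict[str, int]]]:
--     games = []
--     for line in input:
--         line = line.split(":")[1][1:]
--         steps = [x.replace(",", "").lstrip(" ") for x in line.split(";")]
--         game = []
--         for step_str in steps:
--             ball_counts = step_str.split()[::2]
--             ball_colors = step_str.split()[1::2]
--             step = {}
--             for i, color in enumerate(ball_colors):
--                 step[color] = int(ball_counts[i])
--             game.append(step)
--         games.append(game)
--     return games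
-- ===== SOURCE B (Python) =====
-- from typing import Sequence
--
-- def parse_games(input: Sequence[str]) -> list[list[dict[str, int]]]:
--     # single pass per line: ',' is decoration (skipped), whitespace ends a token,
--     # ';' ends a step; tokens alternate count, color
--     games = []
--     for line in input:
--         rest = line.split(":")[1][1:]
--         game = []
--         step = {}
--         pending = None
--         token = ""
--         for ch in rest + ";":  # sentinel ';' closes the last step
--             if ch == ",":
--                 continue
--             if ch == ";" or ch.isspace():
--                 if token:
--                     if pending is None:
--                         pending = token
--                     else:
--                         step[token] = int(pending)
--                         pending = None
--                     token = ""
--                 if ch == ";":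
--                     game.append(step)
--                     step = {}
--                     pending = None
--             else:
--                 token += ch
--         games.append(game)
--     return games
-- ===== Notes on version B (the rewrite author's own statement) =====
-- stated objective: alternative
-- what changed: B replaces A's staged string passes (per-segment replace(',',''), lstrip, split(), two alternating stride slices [::2]/[1::2] re-paired by an enumerate loop indexing the counts slice) with a single character-level scan of the text after the colon: a small state machine that skips commas, ends a token at whitespace, alternates count/color into the dict, and closes a step at each ';'.
import Mathlib
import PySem

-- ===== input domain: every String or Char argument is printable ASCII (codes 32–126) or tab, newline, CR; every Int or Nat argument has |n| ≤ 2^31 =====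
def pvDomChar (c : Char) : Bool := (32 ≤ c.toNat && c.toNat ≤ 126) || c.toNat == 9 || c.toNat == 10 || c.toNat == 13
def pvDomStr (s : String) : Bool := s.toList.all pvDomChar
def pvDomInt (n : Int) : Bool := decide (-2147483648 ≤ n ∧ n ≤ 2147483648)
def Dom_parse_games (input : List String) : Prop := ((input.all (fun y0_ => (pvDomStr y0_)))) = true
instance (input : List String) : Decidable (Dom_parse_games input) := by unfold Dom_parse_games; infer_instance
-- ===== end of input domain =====

-- B replaces A's staged replace/lstrip/split/stride-slice passes with one character-level state
-- machine over the text after the colon (commas skipped, whitespace ends a token, ';' ends a step).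

-- ===== PORT A =====
-- shared line parsing, used by both ports (both Pythons run the same first line):
-- line.split(":") ; [1][1:] ('.getD []' marks the IndexError of a line without ':', excluded by Pre_)
def pvParts (line : String) : List (List Char) := PySem.Chars.splitOn line.toList [':']
def pvAfterColon (line : String) : List Char :=
  PySem.List.slice ((PySem.List.pyGet? (pvParts line) 1).getD []) (some 1) none
def pvSegsOf (line : String) : List (List Char) := PySem.Chars.splitOn (pvAfterColon line) [';']

-- '.getD []' / '.getD 0' mark IndexError / ValueError of the Python; Pre_ excludes those inputs.
def parse_games (input : List String) : List (List (List (String × Int))) :=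
  input.foldl (fun games line =>
    -- steps = [x.replace(",", "").lstrip(" ") for x in line.split(";")]   (lstrip(" ") strips only ' ')
    let steps := (pvSegsOf line).map (fun x => (PySem.Chars.replace x [','] []).dropWhile (· == ' '))
    let game := steps.foldl (fun game step_str =>
      let toks := PySem.Chars.split₀ step_str
      let ball_counts := (PySem.List.slice? toks none none 2).getD []      -- step_str.split()[::2]
      let ball_colors := (PySem.List.slice? toks (some 1) none 2).getD []  -- step_str.split()[1::2]
      -- for i, color in enumerate(ball_colors): step[color] = int(ball_counts[i])
      let step := (PySem.List.enumerate ball_colors 0).foldl (fun d ci =>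
        d.insert (String.ofList ci.2) ((PySem.Int.ofChars? ((PySem.List.pyGet? ball_counts ci.1).getD [])).getD 0)) PySem.Dict.empty
      game ++ [step.items]) []
    games ++ [game]) []

-- ===== PORT B =====
-- one step of B's character scanner; state = (game, step, pending, token).
-- ',' is skipped; ';' or whitespace flushes the token (count if no pending, else step[token] = int(pending));
-- ';' additionally closes the step.  '.getD 0' marks int()'s ValueError, excluded by Pre_.
def pvScanStep (st : List (List (String × Int)) × PySem.Dict String Int × Option (List Char) × List Char)
    (ch : Char) : List (List (String × Int)) × PySem.Dict String Int × Option (List Char) × List Char :=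
  let (game, step, pending, token) := st
  if ch = ',' then (game, step, pending, token)
  else if ch = ';' ∨ PySem.Chars.isspace ch then
    let sp :=
      if token.isEmpty then (step, pending)
      else match pending with
        | none => (step, some token)
        | some p => (step.insert (String.ofList token) ((PySem.Int.ofChars? p).getD 0), none)
    if ch = ';' then (game ++ [sp.1.items], PySem.Dict.empty, none, [])
    else (game, sp.1, sp.2, [])
  else (game, step, pending, token ++ [ch])

def parse_games_alt (input : List String) : List (List (List (String × Int))) :=
  input.foldl (fun games line =>
    -- for ch in rest + ";": …   (sentinel ';' closes the last step)
    let fin := (pvAfterColon line ++ [';']).foldl pvScanStep ([], PySem.Dict.empty, none, [])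
    games ++ [fin.1]) []

-- ===== PRECONDITION & SPEC =====
-- A's token list of a step (commas deleted, left spaces stripped, split on whitespace)
def pvTokA (s : List Char) : List (List Char) :=
  PySem.Chars.split₀ ((PySem.Chars.replace s [','] []).dropWhile (· == ' '))
-- every token read as a count parses as a Python int
def pvAOK (s : List Char) : Bool :=
  (List.range ((pvTokA s).length / 2)).all (fun j => (PySem.Int.ofChars? ((pvTokA s).getD (2 * j) [])).isSome)

-- Pre_ excludes exactly the inputs on which both Pythons raise: a line without ':' (IndexError)
-- and a step whose tokens in count position do not parse as int (ValueError from int()).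
def Pre_parse_games (input : List String) : Prop :=
  ∀ line ∈ input, 2 ≤ (pvParts line).length ∧ ∀ s ∈ pvSegsOf line, pvAOK s = true
instance (input : List String) : Decidable (Pre_parse_games input) := by unfold Pre_parse_games; infer_instance

def pvWitness_parse_games : List String := ["Game 1: 3 blue, 4 red; 1 red, 2 green; 2 green"]

def Spec_parse_games (input : List String) (out : List (List (List (String × Int)))) : Prop :=
  out = parse_games_alt input
instance (input : List String) (out : List (List (List (String × Int)))) : Decidable (Spec_parse_games input out) := by unfold Spec_parse_games; infer_instance

-- ===== CLAIM (what is proved, stated in full; the proofs are below) =====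
def Claim_equal_parse_games : Prop := ∀ (input : List String), Dom_parse_games input → Pre_parse_games input → Spec_parse_games input (parse_games input)

-- ===== LEMMAS AND PROOFS =====
-- even- and odd-indexed elements of a list ( xs[::2] and xs[1::2] )
def pvEvens {α : Type} : List α → List α
  | [] => []
  | [a] => [a]
  | a :: _ :: l => a :: pvEvens l
def pvOdds {α : Type} (l : List α) : List α := pvEvens l.tail
-- disjoint consecutive pairs
def pvPairs {α : Type} : List α → List (α × α)
  | a :: b :: t => (a, b) :: pvPairs t
  | _ => []

theorem pvEvens_cons {α : Type} (a : α) (l : List α) : pvEvens (a :: l) = a :: pvOdds l := by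
  cases l <;> rfl

theorem pv_fm_evens {α : Type} (xs : List α) :
    (List.range ((xs.length + 1) / 2)).filterMap (fun k => xs[2 * k]?) = pvEvens xs := by
  induction xs using pvEvens.induct with
  | case1 => simp [pvEvens]
  | case2 a => simp [pvEvens]
  | case3 a b l ih =>
    have h : ((a :: b :: l).length + 1) / 2 = (l.length + 1) / 2 + 1 := by simp; omega
    rw [h, List.range_succ_eq_map, List.filterMap_cons, List.filterMap_map]
    have h2 : ∀ k : Nat, (a :: b :: l)[2 * Nat.succ k]? = l[2 * k]? := by
      intro k
      have : 2 * Nat.succ k = 2 * k + 1 + 1 := by omega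
      rw [this, List.getElem?_cons_succ, List.getElem?_cons_succ]
    simp only [Nat.mul_zero, List.getElem?_cons_zero, Function.comp_def, h2]
    rw [ih]
    rfl

theorem pv_slice_evens {α : Type} (xs : List α) : PySem.List.slice? xs none none 2 = some (pvEvens xs) := by
  rw [← pv_fm_evens]
  simp only [PySem.List.slice?, PySem.List.sliceIndices]
  norm_num
  have hc : (if 0 < xs.length then (((xs.length : Int) + 2 - 1) / 2).toNat else 0) = (xs.length + 1) / 2 := by
    split_ifs with h
    · omega
    · omega
  rw [hc]
  apply List.filterMap_congr
  intro k _
  congr 1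

theorem pv_slice_odds {α : Type} (xs : List α) : PySem.List.slice? xs (some 1) none 2 = some (pvOdds xs) := by
  cases xs with
  | nil => rfl
  | cons a l =>
    rw [show (pvOdds (a :: l)) = pvEvens l from rfl, ← pv_fm_evens]
    simp only [PySem.List.slice?, PySem.List.sliceIndices]
    norm_num
    have hc : (if 0 < l.length then (((l.length : Int) + 2 - 1) / 2).toNat else 0) = (l.length + 1) / 2 := by
      split_ifs with h <;> omega
    rw [hc]
    apply List.filterMap_congr
    intro k _
    have h1 : ((1 : Int) + 2 * (k : Int)).toNat = 2 * k + 1 := by omega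
    rw [h1, List.getElem?_cons_succ]

theorem pvOdds_length_le {α : Type} (l : List α) : (pvOdds l).length ≤ (pvEvens l).length := by
  induction l using pvEvens.induct with
  | case1 => simp [pvOdds, pvEvens]
  | case2 a => simp [pvOdds, pvEvens]
  | case3 a b l ih =>
    show (pvEvens (b :: l)).length ≤ (a :: pvEvens l).length
    rw [pvEvens_cons]
    simpa [pvOdds] using ih

theorem pv_fold_enum {β γ : Type} (colors : List β) (g : γ → β → List Char → γ) :
    ∀ (k : Nat) (counts : List (List Char)) (d : γ), colors.length + k ≤ counts.length →
    (PySem.List.enumerate colors (k : Int)).foldl (fun d ci => g d ci.2 ((PySem.List.pyGet? counts ci.1).getD [])) d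
      = ((counts.drop k).zip colors).foldl (fun d p => g d p.2 p.1) d := by
  induction colors with
  | nil => intro k counts d h; simp [PySem.List.enumerate]
  | cons c cs ih =>
    intro k counts d h
    have hk : k < counts.length := by simp at h; omega
    rw [show PySem.List.enumerate (c :: cs) (k : Int) = ((k : Int), c) :: PySem.List.enumerate cs ((k : Int) + 1)
      from rfl, List.foldl_cons, List.drop_eq_getElem_cons hk]
    have hget : (PySem.List.pyGet? counts (k : Int)).getD [] = counts[k] := by
      simp [pysem, hk]
    rw [hget, List.zip_cons_cons, List.foldl_cons,
      show ((k : Int) + 1) = ((k + 1 : Nat) : Int) by push_cast; ring]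
    exact ih (k + 1) counts _ (by simp at h ⊢; omega)

theorem pv_zip_pairs {α : Type} (l : List α) : (pvEvens l).zip (pvOdds l) = pvPairs l := by
  induction l using pvPairs.induct with
  | case2 t h =>
    match t, h with
    | [], _ => rfl
    | [a], _ => rfl
    | a :: b :: t, h => exact absurd rfl (h a b t)
  | case1 a b t ih =>
    have he : pvEvens (a :: b :: t) = a :: pvEvens t := rfl
    have ho : pvOdds (a :: b :: t) = b :: pvOdds t := by
      show pvEvens (b :: t) = _
      rw [pvEvens_cons]
    rw [he, ho, List.zip_cons_cons, ih]
    rfl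

-- ---- characterization of split₀ ----
theorem pv_go_acc (s : List Char) : ∀ (cur : List Char) (acc : List (List Char)),
    PySem.Chars.split₀.go s cur acc = acc.reverse ++ PySem.Chars.split₀.go s cur [] := by
  induction s with
  | nil =>
    intro cur acc
    by_cases h : cur.isEmpty <;> simp [PySem.Chars.split₀.go, h]
  | cons c rest ih =>
    intro cur acc
    by_cases hsp : PySem.Chars.isspace c
    · by_cases h : cur.isEmpty
      · simp only [PySem.Chars.split₀.go, hsp, h, if_true]
        rw [ih [] acc]
      · simp only [PySem.Chars.split₀.go, hsp, h, if_true, if_false]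
        rw [ih [] (cur.reverse :: acc), ih [] [cur.reverse]]
        simp
    · simp only [PySem.Chars.split₀.go, hsp]
      rw [ih (c :: cur) acc, ih (c :: cur) []]
      simp

theorem pv_split0_cons_space {c : Char} (hc : PySem.Chars.isspace c = true) (s : List Char) :
    PySem.Chars.split₀ (c :: s) = PySem.Chars.split₀ s := by
  simp [PySem.Chars.split₀, PySem.Chars.split₀.go, hc]

theorem pv_go_cur (s : List Char) : ∀ (cur : List Char), cur ≠ [] →
    PySem.Chars.split₀.go s cur []
      = (cur.reverse ++ s.takeWhile (fun c => !PySem.Chars.isspace c))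
        :: PySem.Chars.split₀ (s.dropWhile (fun c => !PySem.Chars.isspace c)) := by
  induction s with
  | nil =>
    intro cur hcur
    simp [PySem.Chars.split₀.go, PySem.Chars.split₀, List.isEmpty_iff, hcur]
  | cons c rest ih =>
    intro cur hcur
    by_cases hsp : PySem.Chars.isspace c
    · simp only [PySem.Chars.split₀.go, hsp, if_true, List.isEmpty_iff, hcur, if_false]
      rw [pv_go_acc, List.takeWhile_cons, List.dropWhile_cons]
      simp [hsp, pv_split0_cons_space hsp rest]
      rfl
    · simp only [PySem.Chars.split₀.go, hsp, if_false]
      rw [ih (c :: cur) (by simp), List.takeWhile_cons, List.dropWhile_cons]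
      simp [hsp]
  termination_by s => s.length

theorem pv_split0_clean (tok : List Char) (h : ∀ c ∈ tok, PySem.Chars.isspace c = false) :
    PySem.Chars.split₀ tok = if tok.isEmpty then [] else [tok] := by
  cases tok with
  | nil => rfl
  | cons c t =>
    have hc := h c (List.mem_cons_self ..)
    show PySem.Chars.split₀.go (c :: t) [] [] = _
    simp only [PySem.Chars.split₀.go, hc, if_false, List.isEmpty_cons]
    rw [pv_go_cur t [c] (by simp)]
    have ht : t.takeWhile (fun c => !PySem.Chars.isspace c) = t :=
      List.takeWhile_eq_self_iff.mpr (by intro x hx; simp [h x (List.mem_cons_of_mem _ hx)])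
    have hd : t.dropWhile (fun c => !PySem.Chars.isspace c) = [] :=
      List.dropWhile_eq_nil_iff.mpr (by intro x hx; simp [h x (List.mem_cons_of_mem _ hx)])
    rw [ht, hd]
    rfl

theorem pv_split0_clean_append (tok : List Char) (h : ∀ c ∈ tok, PySem.Chars.isspace c = false)
    {c : Char} (hc : PySem.Chars.isspace c = true) (r : List Char) :
    PySem.Chars.split₀ (tok ++ c :: r)
      = (if tok.isEmpty then [] else [tok]) ++ PySem.Chars.split₀ r := by
  cases tok with
  | nil => simpa using pv_split0_cons_space hc r
  | cons t0 t =>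
    have h0 := h t0 (List.mem_cons_self ..)
    show PySem.Chars.split₀.go (t0 :: (t ++ c :: r)) [] [] = _
    simp only [PySem.Chars.split₀.go, h0, if_false]
    rw [pv_go_cur (t ++ c :: r) [t0] (by simp)]
    have ht : t.takeWhile (fun x => !PySem.Chars.isspace x) = t :=
      List.takeWhile_eq_self_iff.mpr (by intro x hx; simp [h x (List.mem_cons_of_mem _ hx)])
    have hd : t.dropWhile (fun x => !PySem.Chars.isspace x) = [] :=
      List.dropWhile_eq_nil_iff.mpr (by intro x hx; simp [h x (List.mem_cons_of_mem _ hx)])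
    have htw : (t ++ c :: r).takeWhile (fun x => !PySem.Chars.isspace x) = t := by
      rw [List.takeWhile_append, ht]
      simp [List.takeWhile_cons, hc]
    have hdw : (t ++ c :: r).dropWhile (fun x => !PySem.Chars.isspace x) = c :: r := by
      rw [List.dropWhile_append, hd]
      simp [List.dropWhile_cons, hc]
    rw [htw, hdw, pv_split0_cons_space hc r]
    simp

-- ---- replace s "," "" is a filter ----
theorem pv_rep_go (fuel : Nat) : ∀ (l : List Char) (acc : List Char), l.length ≤ fuel →
    PySem.Chars.replace.go [','] [] fuel l acc = acc.reverse ++ l.filter (fun c => !(c == ',')) := by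
  induction fuel with
  | zero =>
    intro l acc h
    have : l = [] := by cases l <;> simp_all
    subst this
    simp [PySem.Chars.replace.go]
  | succ f ih =>
    intro l acc h
    cases l with
    | nil => simp [PySem.Chars.replace.go]
    | cons c t =>
      have hlen : t.length ≤ f := by simpa using Nat.le_of_succ_le_succ h
      by_cases hc : c = ','
      · subst hc
        have hpre : [','].isPrefixOf (',' :: t) = true := by simp [List.isPrefixOf]
        simp only [PySem.Chars.replace.go, hpre, if_true, List.drop_succ_cons, List.drop_zero,
          List.reverse_nil, List.nil_append]
        rw [show List.drop [','].length (',' :: t) = t from rfl, ih t acc hlen]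
        simp
      · have hpre : [','].isPrefixOf (c :: t) = false := by
          simp [List.isPrefixOf, Ne.symm hc]
        simp only [PySem.Chars.replace.go, hpre, Bool.false_eq_true, if_false]
        rw [ih t (c :: acc) hlen]
        simp [hc]

theorem pv_rep_filter (s : List Char) :
    PySem.Chars.replace s [','] [] = s.filter (fun c => !(c == ',')) := by
  show PySem.Chars.replace.go [','] [] s.length s [] = _
  simpa using pv_rep_go s.length s [] le_rfl

-- ---- splitOn … ";" characterization ----
def pvSplitSemi (pre : List Char) : List Char → List (List Char)
  | [] => [pre]
  | c :: t => if c = ';' then pre :: pvSplitSemi [] t else pvSplitSemi (pre ++ [c]) t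

theorem pv_splitOn_go (fuel : Nat) : ∀ (l cur : List Char) (acc : List (List Char)), l.length < fuel →
    PySem.Chars.splitOn.go [';'] fuel l cur acc = acc.reverse ++ pvSplitSemi cur.reverse l := by
  induction fuel with
  | zero => intro l cur acc h; omega
  | succ f ih =>
    intro l cur acc h
    cases l with
    | nil => simp [PySem.Chars.splitOn.go, pvSplitSemi]
    | cons c t =>
      have hlen : t.length < f := by simpa using Nat.lt_of_succ_lt_succ h
      by_cases hc : c = ';'
      · subst hc
        have hpre : [';'].isPrefixOf (';' :: t) = true := by simp [List.isPrefixOf]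
        simp only [PySem.Chars.splitOn.go, hpre, if_true]
        rw [show List.drop [';'].length (';' :: t) = t from rfl, ih t [] (cur.reverse :: acc) hlen]
        simp [pvSplitSemi]
      · have hpre : [';'].isPrefixOf (c :: t) = false := by
          simp [List.isPrefixOf, Ne.symm hc]
        simp only [PySem.Chars.splitOn.go, hpre, Bool.false_eq_true, if_false]
        rw [ih t (c :: cur) acc hlen]
        simp [pvSplitSemi, hc]

theorem pv_splitOn_semi (s : List Char) : PySem.Chars.splitOn s [';'] = pvSplitSemi [] s := by
  show PySem.Chars.splitOn.go [';'] (s.length + 1) s [] [] = _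
  simpa using pv_splitOn_go (s.length + 1) s [] [] (by omega)

theorem pv_semi_flat (s : List Char) : ∀ pre : List Char,
    ((pvSplitSemi pre s).map (· ++ [';'])).flatten = pre ++ s ++ [';'] := by
  induction s with
  | nil => intro pre; simp [pvSplitSemi]
  | cons c t ih =>
    intro pre
    by_cases hc : c = ';'
    · subst hc; simp [pvSplitSemi, ih]
    · simp [pvSplitSemi, hc, ih]

theorem pv_semi_free (s : List Char) : ∀ pre : List Char, ';' ∉ pre →
    ∀ x ∈ pvSplitSemi pre s, ';' ∉ x := by
  induction s with
  | nil => intro pre hpre x hx; simp [pvSplitSemi] at hx; subst hx; exact hpre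
  | cons c t ih =>
    intro pre hpre x hx
    by_cases hc : c = ';'
    · subst hc
      simp only [pvSplitSemi, if_true] at hx
      rcases List.mem_cons.mp hx with rfl | hx
      · exact hpre
      · exact ih [] (by simp) x hx
    · simp only [pvSplitSemi, hc, if_false] at hx
      exact ih (pre ++ [c]) (by simp [hpre, Ne.symm hc]) x hx

-- ---- token-level automaton ----
def pvTF (toks : List (List Char)) (s : PySem.Dict String Int × Option (List Char)) :
    PySem.Dict String Int × Option (List Char) :=
  toks.foldl (fun s t =>
    match s.2 with
    | none => (s.1, some t)
    | some c => (s.1.insert (String.ofList t) ((PySem.Int.ofChars? c).getD 0), none)) s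

theorem pv_tf_pairs (toks : List (List Char)) : ∀ d : PySem.Dict String Int,
    (pvTF toks (d, none)).1 = (pvPairs toks).foldl (fun d p =>
      d.insert (String.ofList p.2) ((PySem.Int.ofChars? p.1).getD 0)) d := by
  induction toks using pvPairs.induct with
  | case2 t h =>
    match t, h with
    | [], _ => intro d; rfl
    | [a], _ => intro d; rfl
    | a :: b :: t, h => exact absurd rfl (h a b t)
  | case1 a b t ih =>
    intro d
    show (pvTF t (d.insert (String.ofList b) ((PySem.Int.ofChars? a).getD 0), none)).1 = _
    rw [ih]
    rfl

theorem pv_tf_append (x y : List (List Char)) (s : PySem.Dict String Int × Option (List Char)) :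
    pvTF (x ++ y) s = pvTF y (pvTF x s) := List.foldl_append ..

-- ---- B's scanner over one segment ----
theorem pv_scan_seg (g : List Char) (hg : ';' ∉ g) :
    ∀ (tok : List Char), (∀ c ∈ tok, PySem.Chars.isspace c = false) →
    ∀ (game : List (List (String × Int))) (step : PySem.Dict String Int) (pending : Option (List Char)),
    (g ++ [';']).foldl pvScanStep (game, step, pending, tok)
      = (game ++ [(pvTF (PySem.Chars.split₀ (tok ++ g.filter (fun c => !(c == ',')))) (step, pending)).1.items],
         PySem.Dict.empty, none, ([] : List Char)) := by
  induction g with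
  | nil =>
    intro tok htok game step pending
    have hsp := pv_split0_clean tok htok
    simp only [List.filter_nil, List.append_nil, List.nil_append, List.foldl_cons,
      List.foldl_nil, hsp]
    by_cases he : tok.isEmpty
    · simp [pvScanStep, he, pvTF]
    · cases pending <;> simp [pvScanStep, he, pvTF]
  | cons c g' ih =>
    intro tok htok game step pending
    have hg' : ';' ∉ g' := fun hx => hg (List.mem_cons_of_mem _ hx)
    have hcsemi : ¬ c = ';' := fun hx => hg (hx ▸ List.mem_cons_self ..)
    rw [List.cons_append, List.foldl_cons]
    by_cases hc : c = ','
    · subst hc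
      have h1 : pvScanStep (game, step, pending, tok) ',' = (game, step, pending, tok) := by
        simp [pvScanStep]
      rw [h1, ih hg' tok htok game step pending]
      simp
    · by_cases hspc : PySem.Chars.isspace c
      · have hfc : (c :: g').filter (fun x => !(x == ',')) = c :: g'.filter (fun x => !(x == ',')) := by
          simp [hc]
        rw [hfc, pv_split0_clean_append tok htok hspc, pv_tf_append]
        by_cases he : tok.isEmpty
        · have h1 : pvScanStep (game, step, pending, tok) c = (game, step, pending, []) := by
            simp [pvScanStep, hc, hcsemi, hspc, he]
          rw [h1, ih hg' [] (by simp) game step pending]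
          simp [he, pvTF]
        · cases pending with
          | none =>
            have h1 : pvScanStep (game, step, none, tok) c = (game, step, some tok, []) := by
              simp [pvScanStep, hc, hcsemi, hspc, he]
            rw [h1, ih hg' [] (by simp) game step (some tok)]
            simp [he, pvTF]
          | some p =>
            have h1 : pvScanStep (game, step, some p, tok) c
                = (game, step.insert (String.ofList tok) ((PySem.Int.ofChars? p).getD 0), none, []) := by
              simp [pvScanStep, hc, hcsemi, hspc, he]
            rw [h1, ih hg' [] (by simp) game _ none]
            simp [he, pvTF]
      · have h1 : pvScanStep (game, step, pending, tok) c = (game, step, pending, tok ++ [c]) := by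
          simp [pvScanStep, hc, hcsemi, hspc]
        have htok' : ∀ x ∈ tok ++ [c], PySem.Chars.isspace x = false := by
          intro x hx
          rcases List.mem_append.mp hx with hx | hx
          · exact htok x hx
          · simp at hx; subst hx; simpa using hspc
        rw [h1, ih hg' (tok ++ [c]) htok' game step pending]
        simp [hc]

-- scanning all segments (joined back with ';') appends each segment's dict
theorem pv_scan_segs (segs : List (List Char)) (hfree : ∀ x ∈ segs, ';' ∉ x) :
    ∀ game : List (List (String × Int)),
    ((segs.map (· ++ [';'])).flatten).foldl pvScanStep (game, PySem.Dict.empty, none, [])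
      = (game ++ segs.map (fun s =>
          (pvTF (PySem.Chars.split₀ (s.filter (fun c => !(c == ',')))) (PySem.Dict.empty, none)).1.items),
         PySem.Dict.empty, none, ([] : List Char)) := by
  induction segs with
  | nil => intro game; simp
  | cons s t ih =>
    intro game
    rw [List.map_cons, List.flatten_cons, List.foldl_append,
      pv_scan_seg s (hfree s (List.mem_cons_self ..)) [] (by simp) game PySem.Dict.empty none,
      ih (fun x hx => hfree x (List.mem_cons_of_mem _ hx))]
    simp

-- proof-only helpers: A's per-step dict and per-line game value, named for rewriting
def pvStepA (step_str : List Char) : PySem.Dict String Int :=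
  let toks := PySem.Chars.split₀ step_str
  (PySem.List.enumerate ((PySem.List.slice? toks (some 1) none 2).getD []) 0).foldl (fun d ci =>
    d.insert (String.ofList ci.2) ((PySem.Int.ofChars? ((PySem.List.pyGet? ((PySem.List.slice? toks none none 2).getD []) ci.1).getD [])).getD 0)) PySem.Dict.empty

def pvGameA (line : String) : List (List (String × Int)) :=
  (((pvSegsOf line).map (fun x => (PySem.Chars.replace x [','] []).dropWhile (· == ' '))).foldl
    (fun game step_str => game ++ [(pvStepA step_str).items]) [])

theorem pv_split0_dropWhile (l : List Char) :
    PySem.Chars.split₀ (l.dropWhile (· == ' ')) = PySem.Chars.split₀ l := by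
  induction l with
  | nil => rfl
  | cons c t ih =>
    by_cases hc : c = ' '
    · subst hc
      rw [List.dropWhile_cons_of_pos (by simp), ih, pv_split0_cons_space (by decide) t]
    · rw [List.dropWhile_cons_of_neg (by simpa using hc)]

theorem pv_stepA_pairs (step_str : List Char) :
    pvStepA step_str = (pvPairs (PySem.Chars.split₀ step_str)).foldl (fun d p =>
      d.insert (String.ofList p.2) ((PySem.Int.ofChars? p.1).getD 0)) PySem.Dict.empty := by
  show ((PySem.List.enumerate ((PySem.List.slice? (PySem.Chars.split₀ step_str) (some 1) none 2).getD []) 0).foldl _ _) = _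
  rw [pv_slice_evens, pv_slice_odds, Option.getD_some, Option.getD_some]
  have h0 := pv_fold_enum (pvOdds (PySem.Chars.split₀ step_str))
    (fun d col c => d.insert (String.ofList col) ((PySem.Int.ofChars? c).getD 0))
    0 (pvEvens (PySem.Chars.split₀ step_str)) PySem.Dict.empty
    (by simpa using pvOdds_length_le (PySem.Chars.split₀ step_str))
  simp only [Nat.cast_zero] at h0
  rw [h0, List.drop_zero, pv_zip_pairs]

theorem pv_foldl_append_map {α β : Type} (f : α → β) (l : List α) :
    ∀ acc : List β, l.foldl (fun a x => a ++ [f x]) acc = acc ++ l.map f := by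
  induction l with
  | nil => intro acc; simp
  | cons x t ih => intro acc; rw [List.foldl_cons, List.map_cons, ih]; simp

-- ===== VERDICT (by name: the statement is the Claim_ definition above) =====
theorem parse_games_spec : Claim_equal_parse_games := by
  intro input _ _
  show parse_games input = parse_games_alt input
  show (input.foldl (fun games line => games ++ [pvGameA line]) [])
      = input.foldl (fun games line =>
          games ++ [((pvAfterColon line ++ [';']).foldl pvScanStep ([], PySem.Dict.empty, none, [])).1]) []
  rw [pv_foldl_append_map pvGameA input [],
    pv_foldl_append_map (fun line => ((pvAfterColon line ++ [';']).foldl pvScanStep ([], PySem.Dict.empty, none, [])).1) input []]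
  simp only [List.nil_append]
  apply List.map_congr_left
  intro line _
  -- B side: decompose the scan into per-segment dict appends
  have hsegs : pvSegsOf line = pvSplitSemi [] (pvAfterColon line) := pv_splitOn_semi _
  have hflat : ((pvSegsOf line).map (· ++ [';'])).flatten = pvAfterColon line ++ [';'] := by
    rw [hsegs]; simpa using pv_semi_flat (pvAfterColon line) []
  have hfree : ∀ x ∈ pvSegsOf line, ';' ∉ x := by
    rw [hsegs]; exact pv_semi_free (pvAfterColon line) [] (by simp)
  rw [← hflat, pv_scan_segs (pvSegsOf line) hfree []]
  -- A side: each step dict is the pair fold of the comma-filtered tokens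
  unfold pvGameA
  rw [List.foldl_map,
    pv_foldl_append_map (fun x => (pvStepA ((PySem.Chars.replace x [','] []).dropWhile (· == ' '))).items) (pvSegsOf line) [],
    List.nil_append]
  simp only [List.nil_append]
  apply List.map_congr_left
  intro s _
  rw [pv_stepA_pairs, pv_split0_dropWhile, pv_rep_filter, ← pv_tf_pairs]
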